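-- pv_equiv track=rewrite | github.com/KrushnaSonwane/LeetCode-Solutions | 0467-unique-substrings-in-wraparound-string/0467-unique-substrings-in-wraparound-string.py | findSubstringInWraproundString
-- ===== SOURCE A (Python) =====
-- def findSubstringInWraproundString(S: str) -> int:
--     res = 0
--     for ch in range(97, 123, 1):
--         ch, count, i = chr(ch), 0, 0
--         while len(S) > i:
--             if S[i] == ch:
--                 t = 1
--                 while i + 1 < len(S):
--                     if S[i] != 'z':
--                         if ord(S[i]) + 1 != ord(S[i+1]):
--                             break
--                     else:
--                         if S[i+1] != 'a' or S[i] != 'z':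
--                             break
--                     t, i = t + 1, i + 1
--                 count = max(count, t)
--             i += 1
--         res += count
--     return res
-- ===== SOURCE B (Python) =====
-- def findSubstringInWraproundString(S: str) -> int:
--     # Single reverse pass: k = length of the wraparound run starting at i;
--     # best[j] = longest run starting with letter chr(97+j); answer = sum(best).
--     n = len(S)
--     best = [0] * 26
--     k = 0
--     for i in range(n - 1, -1, -1):
--         c = S[i]
--         if 'a' <= c <= 'z':
--             if i + 1 < n and ((c != 'z' and ord(c) + 1 == ord(S[i + 1])) or (c == 'z' and S[i + 1] == 'a')):
--                 k += 1
--             else: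
--                 k = 1
--             j = ord(c) - 97
--             if k > best[j]:
--                 best[j] = k
--         else:
--             k = 0
--     return sum(best)
-- ===== Notes on version B (the rewrite author's own statement) =====
-- stated objective: faster
-- what changed: Replaced A's 26 separate scans (one per letter, each with a nested run-measuring inner loop) by a single reverse pass that maintains the length of the wraparound run starting at the current position and a 26-entry array of per-letter maxima.
import Mathlib
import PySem

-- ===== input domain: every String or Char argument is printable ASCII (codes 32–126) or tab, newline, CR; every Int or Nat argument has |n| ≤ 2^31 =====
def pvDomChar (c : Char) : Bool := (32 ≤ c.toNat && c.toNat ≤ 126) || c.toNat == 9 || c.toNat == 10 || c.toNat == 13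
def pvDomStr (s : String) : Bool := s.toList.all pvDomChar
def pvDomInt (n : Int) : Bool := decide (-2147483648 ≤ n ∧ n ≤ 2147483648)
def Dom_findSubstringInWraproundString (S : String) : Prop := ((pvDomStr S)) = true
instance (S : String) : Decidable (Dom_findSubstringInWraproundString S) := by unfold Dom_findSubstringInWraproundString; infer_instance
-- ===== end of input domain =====

-- B replaces A's 26 per-letter scans by ONE reverse pass (run length + per-letter maxima array); objective: faster (constant factor).

-- ===== PORT A =====
-- A's inner `while i + 1 < len(S): … t, i = t + 1, i + 1` loop; returns the final (t, i).
-- fuel only makes the loop total: it is called with fuel = len(S), more than the iterations the guard allows.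
def pvInnerA (l : List Char) (fuel t i : Nat) : Nat × Nat :=
  match fuel with
  | 0 => (t, i)
  | f+1 =>
    if i + 1 < l.length then
      if l.getD i ' ' ≠ 'z' then
        if (l.getD i ' ').toNat + 1 ≠ (l.getD (i+1) ' ').toNat then (t, i)
        else pvInnerA l f (t+1) (i+1)
      else
        if l.getD (i+1) ' ' ≠ 'a' ∨ l.getD i ' ' ≠ 'z' then (t, i)
        else pvInnerA l f (t+1) (i+1)
    else (t, i)

-- A's outer `while len(S) > i` loop for one letter ch; returns the final count.
-- fuel = len(S) + 1 suffices: i grows by at least 1 per iteration.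
def pvOuterA (l : List Char) (ch : Char) (fuel count i : Nat) : Nat :=
  match fuel with
  | 0 => count
  | f+1 =>
    if l.length > i then
      if l.getD i ' ' = ch then
        pvOuterA l ch f (max count (pvInnerA l l.length 1 i).1) ((pvInnerA l l.length 1 i).2 + 1)
      else pvOuterA l ch f count (i+1)
    else count

def findSubstringInWraproundString (S : String) : Int :=
  (PySem.List.pyRange 97 123 1).foldl
    (fun res ch => res + (pvOuterA S.toList (Char.ofNat ch.toNat) (S.toList.length + 1) 0 0 : Int)) 0

-- ===== PORT B =====
-- body of B's `for i in range(n-1, -1, -1)` loop: process position i with state (best, k)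
def pvStepB (l : List Char) (i : Nat) (st : List Nat × Nat) : List Nat × Nat :=
  let c := l.getD i ' '
  if 'a' ≤ c ∧ c ≤ 'z' then
    let k' := if i + 1 < l.length ∧ ((c ≠ 'z' ∧ c.toNat + 1 = (l.getD (i+1) ' ').toNat) ∨ (c = 'z' ∧ l.getD (i+1) ' ' = 'a'))
              then st.2 + 1 else 1
    let j := c.toNat - 97
    (if k' > st.1.getD j 0 then st.1.set j k' else st.1, k')
  else (st.1, 0)

-- B's descending index loop: `pvLoopB l (i+1) st` processes positions i, i-1, …, 0
def pvLoopB (l : List Char) : Nat → List Nat × Nat → List Nat × Nat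
  | 0, st => st
  | i+1, st => pvLoopB l i (pvStepB l i st)

def findSubstringInWraproundString_alt (S : String) : Int :=
  ((pvLoopB S.toList S.toList.length (List.replicate 26 0, 0)).1.foldl (· + ·) 0 : Nat)

-- ===== PRECONDITION & SPEC =====
def Spec_findSubstringInWraproundString (S : String) (out : Int) : Prop := out = findSubstringInWraproundString_alt S
instance (S : String) (out : Int) : Decidable (Spec_findSubstringInWraproundString S out) := by unfold Spec_findSubstringInWraproundString; infer_instance

-- ===== CLAIM (what is proved, stated in full; the proofs are below) =====
def Claim_equal_findSubstringInWraproundString : Prop := ∀ (S : String), Dom_findSubstringInWraproundString S → Spec_findSubstringInWraproundString S (findSubstringInWraproundString S)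

-- ===== LEMMAS AND PROOFS =====

-- helper facts about characters
theorem pvChar_eq_iff (c d : Char) : c = d ↔ c.toNat = d.toNat := by
  constructor
  · intro h; rw [h]
  · intro h; apply Char.ext; exact UInt32.toNat_inj.mp h

theorem pvChar_le_iff (c d : Char) : c ≤ d ↔ c.toNat ≤ d.toNat := by
  rw [Char.le_def]; exact UInt32.le_iff_toNat_le

-- the continuation test of both programs, as one Bool
def pvCont (l : List Char) (i : Nat) : Bool :=
  decide (i + 1 < l.length) &&
    (if l.getD i ' ' ≠ 'z' then decide ((l.getD i ' ').toNat + 1 = (l.getD (i+1) ' ').toNat)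
     else decide (l.getD (i+1) ' ' = 'a'))

theorem pvCont_true (l : List Char) (i : Nat) :
    pvCont l i = true ↔ (i + 1 < l.length ∧
      ((l.getD i ' ' ≠ 'z' ∧ (l.getD i ' ').toNat + 1 = (l.getD (i+1) ' ').toNat) ∨
       (l.getD i ' ' = 'z' ∧ l.getD (i+1) ' ' = 'a'))) := by
  rw [pvCont, Bool.and_eq_true, decide_eq_true_eq]
  by_cases hz : l.getD i ' ' = 'z'
  · rw [if_neg (not_not.mpr hz), decide_eq_true_eq]
    constructor
    · rintro ⟨ha, hb⟩; exact ⟨ha, Or.inr ⟨hz, hb⟩⟩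
    · rintro ⟨ha, ⟨hb, -⟩ | ⟨-, hb⟩⟩
      · exact absurd hz hb
      · exact ⟨ha, hb⟩
  · rw [if_pos hz, decide_eq_true_eq]
    constructor
    · rintro ⟨ha, hb⟩; exact ⟨ha, Or.inl ⟨hz, hb⟩⟩
    · rintro ⟨ha, ⟨-, hb⟩ | ⟨hb, -⟩⟩
      · exact ⟨ha, hb⟩
      · exact absurd hb hz

theorem pvCont_lt {l : List Char} {i : Nat} (h : pvCont l i = true) : i + 1 < l.length :=
  ((pvCont_true l i).mp h).1

-- length of the wraparound run starting at position i
def pvRunlen (l : List Char) (i : Nat) : Nat :=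
  if i < l.length then (if h : pvCont l i = true then pvRunlen l (i+1) + 1 else 1) else 0
termination_by l.length - i
decreasing_by have := pvCont_lt h; omega

theorem pvRunlen_pos {l : List Char} {i : Nat} (h : i < l.length) : 1 ≤ pvRunlen l i := by
  rw [pvRunlen]; split_ifs <;> omega

theorem pvRunlen_le (l : List Char) (i : Nat) : pvRunlen l i ≤ l.length - i := by
  induction i using pvRunlen.induct l with
  | case1 i h hc ih => rw [pvRunlen]; have := pvCont_lt hc; simp [h, hc] at *; omega
  | case2 i h hc => rw [pvRunlen]; simp [h, hc]; omega
  | case3 i h => rw [pvRunlen]; simp [h]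

theorem pvRunlen_cont {l : List Char} {i : Nat} (hc : pvCont l i = true) :
    pvRunlen l i = pvRunlen l (i+1) + 1 := by
  have h := pvCont_lt hc
  rw [pvRunlen]; simp [hc]; omega

theorem pvRunlen_not_cont {l : List Char} {i : Nat} (h : i < l.length) (hc : ¬ pvCont l i = true) :
    pvRunlen l i = 1 := by
  rw [pvRunlen]; simp [h, hc]

-- skipped positions inside a run have smaller run lengths
theorem pvRunlen_add (l : List Char) (d i : Nat) (hd : d < pvRunlen l i) :
    pvRunlen l (i + d) = pvRunlen l i - d := by
  induction d generalizing i with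
  | zero => simp
  | succ d ih =>
      have hi : i < l.length := by
        by_contra h; rw [pvRunlen] at hd; simp [h] at hd
      have hc : pvCont l i = true := by
        by_contra h; rw [pvRunlen_not_cont hi h] at hd; omega
      have hr := pvRunlen_cont hc
      have : pvRunlen l (i + 1 + d) = pvRunlen l (i+1) - d := ih (i+1) (by omega)
      have he : i + (d+1) = i + 1 + d := by omega
      rw [he, this]; omega

-- A's answer for one letter: max over positions p ≥ i of the run length at p when l[p] = ch
def pvMaxFrom (l : List Char) (ch : Char) (i : Nat) : Nat :=
  if i < l.length then
    max (if l.getD i ' ' = ch then pvRunlen l i else 0) (pvMaxFrom l ch (i+1))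
  else 0
termination_by l.length - i

-- the inner while computes the run length (and leaves i at the run's last position)
theorem pvInnerA_eq (l : List Char) (fuel t i : Nat) (h : i < l.length)
    (hf : l.length ≤ fuel + i + 1) :
    pvInnerA l fuel t i = (t + pvRunlen l i - 1, i + pvRunlen l i - 1) := by
  induction fuel generalizing t i with
  | zero =>
      have hc : ¬ pvCont l i = true := by
        rw [pvCont_true]; rintro ⟨hx, -⟩; omega
      rw [pvInnerA, pvRunlen_not_cont h hc]
      simp only [Nat.add_sub_cancel]
  | succ f ih =>
      rw [pvInnerA]
      by_cases h1 : i + 1 < l.length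
      · rw [if_pos h1]
        by_cases h2 : l.getD i ' ' ≠ 'z'
        · rw [if_pos h2]
          by_cases h3 : (l.getD i ' ').toNat + 1 ≠ (l.getD (i+1) ' ').toNat
          · have hc : ¬ pvCont l i = true := by
              rw [pvCont_true]; rintro ⟨-, ⟨-, hx⟩ | ⟨hx, -⟩⟩
              · exact h3 hx
              · exact h2 hx
            rw [if_pos h3, pvRunlen_not_cont h hc]
            simp only [Nat.add_sub_cancel]
          · have hc : pvCont l i = true :=
              (pvCont_true l i).mpr ⟨h1, Or.inl ⟨h2, not_not.mp h3⟩⟩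
            rw [if_neg h3, ih (t+1) (i+1) h1 (by omega), pvRunlen_cont hc]
            have hp := pvRunlen_pos (l := l) (i := i + 1) h1
            simp only [Prod.mk.injEq]
            constructor <;> omega
        · rw [if_neg h2]
          have hz : l.getD i ' ' = 'z' := not_not.mp h2
          by_cases h3 : l.getD (i+1) ' ' ≠ 'a' ∨ l.getD i ' ' ≠ 'z'
          · have hna : l.getD (i+1) ' ' ≠ 'a' := by
              rcases h3 with h' | h'
              · exact h'
              · exact absurd hz h'
            have hc : ¬ pvCont l i = true := by
              rw [pvCont_true]; rintro ⟨-, ⟨hx, -⟩ | ⟨-, hx⟩⟩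
              · exact hx hz
              · exact hna hx
            rw [if_pos h3, pvRunlen_not_cont h hc]
            simp only [Nat.add_sub_cancel]
          · rw [not_or] at h3
            have hna : l.getD (i+1) ' ' = 'a' := not_not.mp h3.1
            have hc : pvCont l i = true :=
              (pvCont_true l i).mpr ⟨h1, Or.inr ⟨hz, hna⟩⟩
            rw [if_neg (not_or.mpr h3), ih (t+1) (i+1) h1 (by omega), pvRunlen_cont hc]
            have hp := pvRunlen_pos (l := l) (i := i + 1) h1
            simp only [Prod.mk.injEq]
            constructor <;> omega
      · have hc : ¬ pvCont l i = true := by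
          rw [pvCont_true]; rintro ⟨hx, -⟩; exact h1 hx
        rw [if_neg h1, pvRunlen_not_cont h hc]
        simp only [Nat.add_sub_cancel]

-- skipping the interior of a measured run does not change the max
theorem pvMaxFrom_skip (l : List Char) (ch : Char) (i : Nat) (d : Nat)
    (hd : d < pvRunlen l i) :
    max (pvRunlen l i) (pvMaxFrom l ch (i + 1)) = max (pvRunlen l i) (pvMaxFrom l ch (i + 1 + d)) := by
  induction d with
  | zero => rfl
  | succ d ih =>
      have hle := pvRunlen_le l i
      have hin : i + 1 + d < l.length := by omega
      have hrd : pvRunlen l (i + (1 + d)) = pvRunlen l i - (1 + d) :=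
        pvRunlen_add l (1 + d) i (by omega)
      have he : i + (1 + d) = i + 1 + d := by omega
      rw [he] at hrd
      rw [ih (by omega)]
      rw [pvMaxFrom]
      simp only [if_pos hin]
      have hv : (if l.getD (i + 1 + d) ' ' = ch then pvRunlen l (i + 1 + d) else 0) ≤ pvRunlen l i := by
        split_ifs <;> omega
      have he2 : i + 1 + (d + 1) = i + 1 + d + 1 := by omega
      rw [he2]
      omega

-- A's outer loop computes the running max of run lengths at the positions holding ch
theorem pvOuterA_eq (l : List Char) (ch : Char) (fuel count i : Nat)
    (hf : l.length + 1 ≤ fuel + i) :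
    pvOuterA l ch fuel count i = max count (pvMaxFrom l ch i) := by
  induction fuel generalizing count i with
  | zero =>
      have hi : ¬ i < l.length := by omega
      rw [pvOuterA, pvMaxFrom]
      simp only [if_neg hi]
      omega
  | succ f ih =>
      rw [pvOuterA]
      by_cases h1 : l.length > i
      · rw [if_pos h1]
        by_cases h2 : l.getD i ' ' = ch
        · rw [if_pos h2]
          have hi : i < l.length := h1
          have hp := pvRunlen_pos hi
          have hinner := pvInnerA_eq l l.length 1 i hi (by omega)
          have hfst : (pvInnerA l l.length 1 i).1 = pvRunlen l i := by
            rw [hinner]; show 1 + pvRunlen l i - 1 = pvRunlen l i; omega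
          have hsnd : (pvInnerA l l.length 1 i).2 + 1 = i + pvRunlen l i := by
            rw [hinner]; show i + pvRunlen l i - 1 + 1 = i + pvRunlen l i; omega
          have hrl := pvRunlen_le l i
          rw [hfst, hsnd, ih (max count (pvRunlen l i)) (i + pvRunlen l i) (by omega)]
          have hskip := pvMaxFrom_skip l ch i (pvRunlen l i - 1) (by omega)
          have he : i + 1 + (pvRunlen l i - 1) = i + pvRunlen l i := by omega
          rw [he] at hskip
          conv_rhs => rw [pvMaxFrom]
          simp only [if_pos hi, if_pos h2]
          omega
        · rw [if_neg h2]
          have hi : i < l.length := h1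
          rw [ih count (i+1) (by omega)]
          conv_rhs => rw [pvMaxFrom]
          simp only [if_pos hi, if_neg h2]
          omega
      · have hi : ¬ i < l.length := h1
        rw [if_neg h1, pvMaxFrom]
        simp only [if_neg hi]
        omega

-- B-side variant of pvMaxFrom, keyed by the letter index j (0..25)
def pvMaxFromN (l : List Char) (j i : Nat) : Nat :=
  if i < l.length then
    max (if (l.getD i ' ').toNat = 97 + j then pvRunlen l i else 0) (pvMaxFromN l j (i+1))
  else 0
termination_by l.length - i

theorem pvMaxFrom_eq_N (l : List Char) (ch : Char) (j : Nat) (h : ch.toNat = 97 + j) (i : Nat) :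
    pvMaxFrom l ch i = pvMaxFromN l j i := by
  induction i using pvMaxFromN.induct l with
  | case1 i hi ih =>
      have hiff : (l.getD i ' ' = ch) ↔ ((l.getD i ' ').toNat = 97 + j) := by
        rw [pvChar_eq_iff, h]
      rw [pvMaxFrom, pvMaxFromN]
      simp only [if_pos hi, hiff, ih]
  | case2 i hi =>
      rw [pvMaxFrom, pvMaxFromN]
      simp only [if_neg hi]

-- B-side: the k value held after processing position i
def pvKrun (l : List Char) (i : Nat) : Nat :=
  if i < l.length then
    (if 'a' ≤ l.getD i ' ' ∧ l.getD i ' ' ≤ 'z' then pvRunlen l i else 0)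
  else 0

-- one step of B preserves the invariant
-- getD after set at a different index
theorem pvGetD_set_ne (bs : List Nat) (m n v : Nat) (h : m ≠ n) :
    (bs.set m v).getD n 0 = bs.getD n 0 := by
  simp [List.getD_eq_getElem?_getD, List.getElem?_set_ne, h]

-- lowercase test as numeric bounds on the code point
theorem pvLower_iff (c : Char) : ('a' ≤ c ∧ c ≤ 'z') ↔ (97 ≤ c.toNat ∧ c.toNat ≤ 122) := by
  have ha : ('a' : Char).toNat = 97 := rfl
  have hz : ('z' : Char).toNat = 122 := rfl
  rw [pvChar_le_iff, pvChar_le_iff, ha, hz]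

theorem pvStepB_inv (l : List Char) (i : Nat) (best : List Nat) (k : Nat)
    (hi : i < l.length) (hlen : best.length = 26)
    (hbest : ∀ j, j < 26 → best.getD j 0 = pvMaxFromN l j (i+1))
    (hk : k = pvKrun l (i+1)) :
    (pvStepB l i (best, k)).2 = pvKrun l i ∧ (pvStepB l i (best, k)).1.length = 26 ∧
      ∀ j, j < 26 → (pvStepB l i (best, k)).1.getD j 0 = pvMaxFromN l j i := by
  have hz122 : ('z' : Char).toNat = 122 := rfl
  by_cases hlow : 'a' ≤ l.getD i ' ' ∧ l.getD i ' ' ≤ 'z'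
  · obtain ⟨h97, h122⟩ := (pvLower_iff _).mp hlow
    have hkr : (if (i + 1 < l.length ∧ ((l.getD i ' ' ≠ 'z' ∧ (l.getD i ' ').toNat + 1 = (l.getD (i+1) ' ').toNat) ∨ (l.getD i ' ' = 'z' ∧ l.getD (i+1) ' ' = 'a'))) then k + 1 else 1) = pvRunlen l i := by
      by_cases hcond : (i + 1 < l.length ∧ ((l.getD i ' ' ≠ 'z' ∧ (l.getD i ' ').toNat + 1 = (l.getD (i+1) ' ').toNat) ∨ (l.getD i ' ' = 'z' ∧ l.getD (i+1) ' ' = 'a')))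
      · have hc : pvCont l i = true := (pvCont_true l i).mpr hcond
        have hnl : 'a' ≤ l.getD (i+1) ' ' ∧ l.getD (i+1) ' ' ≤ 'z' := by
          rcases hcond.2 with ⟨hne, hsucc⟩ | ⟨-, hna⟩
          · have : (l.getD i ' ').toNat ≠ 122 := by
              intro hx; exact hne ((pvChar_eq_iff _ _).mpr (by rw [hx, hz122]))
            exact (pvLower_iff _).mpr (by omega)
          · rw [hna]; exact ⟨by decide, by decide⟩
        have hkv : k = pvRunlen l (i+1) := by
          rw [hk, pvKrun, if_pos hcond.1, if_pos hnl]
        rw [if_pos hcond, hkv, pvRunlen_cont hc]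
      · have hc : ¬ pvCont l i = true := fun h => hcond ((pvCont_true l i).mp h)
        rw [if_neg hcond, pvRunlen_not_cont hi hc]
    have hkri : pvKrun l i = pvRunlen l i := by rw [pvKrun, if_pos hi, if_pos hlow]
    refine ⟨?_, ?_, ?_⟩
    · simp only [pvStepB, if_pos hlow]
      rw [hkri, ← hkr]
    · simp only [pvStepB, if_pos hlow]
      split_ifs <;> simp [hlen]
    · intro j' hj'
      rw [pvMaxFromN, if_pos hi]
      simp only [pvStepB, if_pos hlow]
      rw [hkr]
      by_cases hjj : (l.getD i ' ').toNat = 97 + j'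
      · have hjx : (l.getD i ' ').toNat - 97 = j' := by omega
        rw [if_pos hjj, hjx]
        by_cases hgt : pvRunlen l i > best.getD j' 0
        · rw [if_pos hgt]
          have hset : (best.set j' (pvRunlen l i)).getD j' 0 = pvRunlen l i := by
            simp [List.getD_eq_getElem?_getD, hlen, hj']
          rw [hbest j' hj'] at hgt
          rw [hset]
          omega
        · rw [if_neg hgt]
          rw [hbest j' hj'] at hgt ⊢
          omega
      · have hne2 : (l.getD i ' ').toNat - 97 ≠ j' := by omega
        rw [if_neg hjj]
        have hun : ∀ v, (best.set ((l.getD i ' ').toNat - 97) v).getD j' 0 = best.getD j' 0 :=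
          fun v => pvGetD_set_ne best _ j' v hne2
        split_ifs with hgt
        · rw [hun, hbest j' hj']; omega
        · rw [hbest j' hj']
          omega
  · refine ⟨?_, ?_, ?_⟩
    · simp only [pvStepB, if_neg hlow]
      rw [pvKrun, if_pos hi, if_neg hlow]
    · simp only [pvStepB, if_neg hlow]
      exact hlen
    · intro j' hj'
      rw [pvMaxFromN, if_pos hi]
      simp only [pvStepB, if_neg hlow]
      have hjj : ¬ (l.getD i ' ').toNat = 97 + j' := by
        intro hx
        exact hlow ((pvLower_iff _).mpr (by omega))
      rw [if_neg hjj, hbest j' hj']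
      omega

-- the whole descending loop establishes the invariant at 0
theorem pvLoopB_inv (l : List Char) (i : Nat) (best : List Nat) (k : Nat)
    (hi : i ≤ l.length) (hlen : best.length = 26)
    (hbest : ∀ j, j < 26 → best.getD j 0 = pvMaxFromN l j i)
    (hk : k = pvKrun l i) :
    (pvLoopB l i (best, k)).1.length = 26 ∧
      ∀ j, j < 26 → (pvLoopB l i (best, k)).1.getD j 0 = pvMaxFromN l j 0 := by
  induction i generalizing best k with
  | zero => exact ⟨hlen, hbest⟩
  | succ i ih =>
      have hi' : i < l.length := by omega
      obtain ⟨h1, h2, h3⟩ := pvStepB_inv l i best k hi' hlen hbest hk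
      rw [pvLoopB]
      have := ih (pvStepB l i (best, k)).1 (pvStepB l i (best, k)).2 (by omega) h2 h3 h1
      simpa using this

-- ===== VERDICT (by name: the statement is the Claim_ definition above) =====
theorem findSubstringInWraproundString_spec : Claim_equal_findSubstringInWraproundString := by
  unfold Claim_equal_findSubstringInWraproundString
  intro S _
  unfold Spec_findSubstringInWraproundString findSubstringInWraproundString findSubstringInWraproundString_alt
  have hrange : PySem.List.pyRange 97 123 1 = [97,98,99,100,101,102,103,104,105,106,107,108,109,110,111,112,113,114,115,116,117,118,119,120,121,122] := rfl
  rw [hrange]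
  have h0 : ∀ j, j < 26 → (List.replicate 26 (0:Nat)).getD j 0 = pvMaxFromN S.toList j S.toList.length := by
    intro j hj
    rw [pvMaxFromN, List.getD_replicate 0 hj]
    simp
  have hk0 : (0:Nat) = pvKrun S.toList S.toList.length := by rw [pvKrun]; simp
  obtain ⟨hlen, hget⟩ := pvLoopB_inv S.toList S.toList.length (List.replicate 26 0) 0 (le_refl _) (by simp) h0 hk0
  have hbl : (pvLoopB S.toList S.toList.length (List.replicate 26 0, 0)).1
      = (List.range 26).map (fun j => pvMaxFromN S.toList j 0) := by
    apply List.ext_getElem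
    · rw [hlen, List.length_map, List.length_range]
    · intro n h1 h2
      have hn : n < 26 := by rw [hlen] at h1; exact h1
      rw [← List.getD_eq_getElem _ 0 h1, hget n hn]
      simp only [List.getElem_map, List.getElem_range]
  rw [hbl]
  have hr26 : List.range 26 = [0,1,2,3,4,5,6,7,8,9,10,11,12,13,14,15,16,17,18,19,20,21,22,23,24,25] := rfl
  rw [hr26]
  have hA : ∀ (c : Char) (j : Nat), c.toNat = 97 + j →
      pvOuterA S.toList c (S.toList.length + 1) 0 0 = pvMaxFromN S.toList j 0 := by
    intro c j hcj
    rw [pvOuterA_eq S.toList c (S.toList.length + 1) 0 0 (by omega), pvMaxFrom_eq_N S.toList c j hcj 0]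
    omega
  simp only [List.map, List.foldl]
  rw [hA (Char.ofNat ((97:Int).toNat)) 0 (by decide)]
  rw [hA (Char.ofNat ((98:Int).toNat)) 1 (by decide)]
  rw [hA (Char.ofNat ((99:Int).toNat)) 2 (by decide)]
  rw [hA (Char.ofNat ((100:Int).toNat)) 3 (by decide)]
  rw [hA (Char.ofNat ((101:Int).toNat)) 4 (by decide)]
  rw [hA (Char.ofNat ((102:Int).toNat)) 5 (by decide)]
  rw [hA (Char.ofNat ((103:Int).toNat)) 6 (by decide)]
  rw [hA (Char.ofNat ((104:Int).toNat)) 7 (by decide)]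
  rw [hA (Char.ofNat ((105:Int).toNat)) 8 (by decide)]
  rw [hA (Char.ofNat ((106:Int).toNat)) 9 (by decide)]
  rw [hA (Char.ofNat ((107:Int).toNat)) 10 (by decide)]
  rw [hA (Char.ofNat ((108:Int).toNat)) 11 (by decide)]
  rw [hA (Char.ofNat ((109:Int).toNat)) 12 (by decide)]
  rw [hA (Char.ofNat ((110:Int).toNat)) 13 (by decide)]
  rw [hA (Char.ofNat ((111:Int).toNat)) 14 (by decide)]
  rw [hA (Char.ofNat ((112:Int).toNat)) 15 (by decide)]
  rw [hA (Char.ofNat ((113:Int).toNat)) 16 (by decide)]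
  rw [hA (Char.ofNat ((114:Int).toNat)) 17 (by decide)]
  rw [hA (Char.ofNat ((115:Int).toNat)) 18 (by decide)]
  rw [hA (Char.ofNat ((116:Int).toNat)) 19 (by decide)]
  rw [hA (Char.ofNat ((117:Int).toNat)) 20 (by decide)]
  rw [hA (Char.ofNat ((118:Int).toNat)) 21 (by decide)]
  rw [hA (Char.ofNat ((119:Int).toNat)) 22 (by decide)]
  rw [hA (Char.ofNat ((120:Int).toNat)) 23 (by decide)]
  rw [hA (Char.ofNat ((121:Int).toNat)) 24 (by decide)]
  rw [hA (Char.ofNat ((122:Int).toNat)) 25 (by decide)]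
  push_cast
  ring
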